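-- pv_equiv track=rewrite | github.com/FilipeAz/IST-FP | Project2/2048.py | tabuleiro_preenche_posicao
-- ===== SOURCE A (Python) =====
-- def cria_coordenada(int1,int2):
--     '''cria_coordenada: inteiros --> tuplo(int,int)
--         A funcao cria_coordenada recebe como argumento um inteiro l e um inteiro c (entre 1 e 4)
--         e devolve um elemento do tipo coordenada correspondente a posicao (l, c)'''
--     if 0 < int1 < 5 and 0 < int2 < 5:
--         return (int1,int2)
--     else:
--         raise ValueError('cria_coordenada: argumentos invalidos')
--
-- def coordenada_linha(coordenada):
--     '''coordenada_linha: tuplo(int,int) --> int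
--        A funcao coordenada_linha recebe como argumento um elemento do tipo coordenada e devolve a linha respetiva.'''
--     return coordenada[0]
--
-- def coordenada_coluna(coordenada):
--     ''' coordenada_coluna: tuplo(int,int) --> int
--         A funcao coordenada_coluna recebe como argumento um elemento do tipo coordenada e devolve a coluna respetiva.'''
--     return coordenada[1]
--
-- def e_coordenada(arg):
--     '''e_coordenada: universal --> True/False
--         A funcao e_coordenada recebe um unico argumento e devolve True caso esse argumento seja do tipo coordenada, e False em caso contrario'''
--     if isinstance(arg, tuple) and len(arg) == 2:
--         if 0 < arg[0] < 5 and 0 < arg[1] < 5: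
--             return True
--         else:
--             return False
--     else:
--         return False
--
-- def coordenadas_iguais(c1,c2):
--     ''' coordenadas_iguais: tuplo(int,int) tuplo(int,int) --> True/False
--         A funcao coordenadas_iguais recebe como argumentos dois elementos do tipo coordenada e devolve True caso esses argumentos correspondam a mesma posicao (l, c) do tabuleiro, e False em caso contrario.'''
--     if e_coordenada(c1) and e_coordenada(c2):
--         return c1 == c2
--     else:
--         return False
--
-- def tabuleiro_preenche_posicao(t,pos,v):
--     ''' tabuleiro_preenche_posicao: tabuleiro tuplo(int,int) int -->  tabuleiro
--         Este modificador recebe como argumentos um elemento t do tipo tabuleiro, um elemento c do tipo coordenada e um inteiro v, e modifica o tabuleiro t, colocando o valor v na posição correspondente à coordenada c. A função deve devolver o tabuleiro modificado.'''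
--     if e_coordenada(pos) and isinstance(v,int):
--         for l in range(1,5):
--             for c in range(1,5):
--                 coord = cria_coordenada(l,c)
--                 if coordenadas_iguais(coord,pos):
--                     t[coordenada_linha(pos)- 1][coordenada_coluna(pos)-1] = v
--         return t
--     else:
--         raise ValueError('tabuleiro_preenche_posicao: argumentos invalidos')
-- ===== SOURCE B (Python) =====
-- def e_coordenada(arg):
--     if isinstance(arg, tuple) and len(arg) == 2:
--         if 0 < arg[0] < 5 and 0 < arg[1] < 5:
--             return True
--         else:
--             return False
--     else:
--         return False
--
-- def tabuleiro_preenche_posicao(t, pos, v):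
--     # Direct arithmetic indexing instead of scanning all 16 coordinates.
--     # Mutates t in place like the original, and returns it.
--     if not (e_coordenada(pos) and isinstance(v, int)):
--         raise ValueError('tabuleiro_preenche_posicao: argumentos invalidos')
--     t[pos[0] - 1][pos[1] - 1] = v
--     return t
-- ===== Notes on version B (the rewrite author's own statement) =====
-- stated objective: simpler
-- what changed: Replaces the nested 1..4 loops that regenerate every coordinate and compare it with pos by one direct assignment t[pos[0]-1][pos[1]-1]=v after the same validation.
import Mathlib
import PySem

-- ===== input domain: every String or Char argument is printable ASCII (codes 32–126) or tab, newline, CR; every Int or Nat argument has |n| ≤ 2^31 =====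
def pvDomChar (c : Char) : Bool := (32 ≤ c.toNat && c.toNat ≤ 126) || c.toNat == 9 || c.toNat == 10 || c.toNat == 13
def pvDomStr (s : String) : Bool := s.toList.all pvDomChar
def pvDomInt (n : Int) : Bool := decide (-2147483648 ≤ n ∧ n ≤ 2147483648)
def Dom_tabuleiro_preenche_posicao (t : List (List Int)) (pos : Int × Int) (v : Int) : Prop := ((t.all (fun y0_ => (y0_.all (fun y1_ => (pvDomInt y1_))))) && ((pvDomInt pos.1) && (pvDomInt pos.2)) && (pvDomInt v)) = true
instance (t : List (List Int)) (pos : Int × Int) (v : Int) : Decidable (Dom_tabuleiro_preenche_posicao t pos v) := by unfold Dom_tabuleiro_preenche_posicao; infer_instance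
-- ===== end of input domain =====

-- B replaces A's nested 1..4 coordinate scan by one direct indexed assignment (simpler).
-- Both A and B mutate the argument list in place in Python; equivalence here is about the return value.


-- ===== PORT A =====
-- e_coordenada: the isinstance/len checks are always true under the type Int × Int
def e_coordenada (arg : Int × Int) : Bool :=
  if 0 < arg.1 ∧ arg.1 < 5 ∧ 0 < arg.2 ∧ arg.2 < 5 then true else false

def coordenadas_iguais (c1 c2 : Int × Int) : Bool :=
  if e_coordenada c1 && e_coordenada c2 then decide (c1 = c2) else false

-- Python `t[r][c] = v`; under Pre_ both indices are in range, where pySetD is exact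
def pySetCell (t : List (List Int)) (pos : Int × Int) (v : Int) : List (List Int) :=
  PySem.List.pySetD t (pos.1 - 1)
    (PySem.List.pySetD (PySem.List.pyGetD t (pos.1 - 1) []) (pos.2 - 1) v)

def tabuleiro_preenche_posicao (t : List (List Int)) (pos : Int × Int) (v : Int) : List (List Int) :=
  if e_coordenada pos then
    (PySem.List.pyRange 1 5 1).foldl (fun acc l =>
      (PySem.List.pyRange 1 5 1).foldl (fun acc2 c =>
        let coord := (l, c)   -- cria_coordenada l c: l, c ∈ [1,4] so it returns (l, c)
        if coordenadas_iguais coord pos then pySetCell acc2 pos v else acc2) acc) t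
  else t   -- Python raises ValueError here; excluded by Pre_

-- ===== PORT B =====
def tabuleiro_preenche_posicao_alt (t : List (List Int)) (pos : Int × Int) (v : Int) : List (List Int) :=
  if ¬ (e_coordenada pos) then t   -- Python raises ValueError here; excluded by Pre_
  else pySetCell t pos v

-- ===== PRECONDITION & SPEC =====
-- Pre_: exactly where A returns: pos is a valid coordinate and the addressed row and cell exist.
def Pre_tabuleiro_preenche_posicao (t : List (List Int)) (pos : Int × Int) (v : Int) : Prop :=
  e_coordenada pos = true ∧ (pos.1 - 1).toNat < t.length ∧
    (pos.2 - 1).toNat < (t.getD (pos.1 - 1).toNat []).length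
instance (t : List (List Int)) (pos : Int × Int) (v : Int) : Decidable (Pre_tabuleiro_preenche_posicao t pos v) := by unfold Pre_tabuleiro_preenche_posicao; infer_instance

def pvWitness_tabuleiro_preenche_posicao : List (List Int) × (Int × Int) × Int :=
  ([[0, 0, 0, 0], [0, 0, 0, 0], [0, 0, 0, 0], [0, 0, 0, 0]], (2, 3), 7)

def Spec_tabuleiro_preenche_posicao (t : List (List Int)) (pos : Int × Int) (v : Int) (out : List (List Int)) : Prop := out = tabuleiro_preenche_posicao_alt t pos v
instance (t : List (List Int)) (pos : Int × Int) (v : Int) (out : List (List Int)) : Decidable (Spec_tabuleiro_preenche_posicao t pos v out) := by unfold Spec_tabuleiro_preenche_posicao; infer_instance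

-- ===== CLAIM (what is proved, stated in full; the proofs are below) =====
def Claim_equal_tabuleiro_preenche_posicao : Prop := ∀ (t : List (List Int)) (pos : Int × Int) (v : Int), Dom_tabuleiro_preenche_posicao t pos v → Pre_tabuleiro_preenche_posicao t pos v → Spec_tabuleiro_preenche_posicao t pos v (tabuleiro_preenche_posicao t pos v)

-- ===== LEMMAS AND PROOFS =====
theorem tpp_fold_eq (t : List (List Int)) (pos : Int × Int) (v : Int)
    (h : e_coordenada pos = true) :
    tabuleiro_preenche_posicao t pos v = pySetCell t pos v := by
  obtain ⟨a, b⟩ := pos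
  have ha1 : 0 < a := by simp [e_coordenada] at h; omega
  have ha2 : a < 5 := by simp [e_coordenada] at h; omega
  have hb1 : 0 < b := by simp [e_coordenada] at h; omega
  have hb2 : b < 5 := by simp [e_coordenada] at h; omega
  interval_cases a <;> interval_cases b <;>
    simp [tabuleiro_preenche_posicao, coordenadas_iguais, e_coordenada,
      PySem.List.pyRange, List.range_succ]

-- ===== VERDICT (by name: the statement is the Claim_ definition above) =====
theorem tabuleiro_preenche_posicao_spec : Claim_equal_tabuleiro_preenche_posicao := by
  intro t pos v _ hpre
  unfold Spec_tabuleiro_preenche_posicao tabuleiro_preenche_posicao_alt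
  rw [tpp_fold_eq t pos v hpre.1]
  simp [hpre.1]
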